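-- pv_equiv track=rewrite | github.com/cristoxdxd/HCI-Project | machineLearning/train_model.py | calculate_consecutive_correct
-- ===== SOURCE A (Python) =====
-- def calculate_consecutive_correct(series):
--     """
--     Calcula la cantidad de respuestas correctas consecutivas para cada usuario.
--     """
--     count = 0
--     streaks = []
--     for value in series:
--         if value == 1:
--             count += 1
--         else:
--             count = 0
--         streaks.append(count)
--     return streaks
-- ===== SOURCE B (Python) =====
-- from itertools import groupby
--
-- def calculate_consecutive_correct(series):
--     """
--     Calcula la cantidad de respuestas correctas consecutivas para cada usuario.
--     """
--     streaks = []
--     for is_one, group in groupby(series, key=lambda v: v == 1):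
--         n = sum(1 for _ in group)
--         if is_one:
--             streaks.extend(range(1, n + 1))
--         else:
--             streaks.extend([0] * n)
--     return streaks
-- ===== Notes on version B (the rewrite author's own statement) =====
-- stated objective: alternative
-- what changed: Replaces the per-element carried counter with itertools.groupby run-splitting: each maximal run of ones emits the ascending range at once and each other run emits zeros.
import Mathlib
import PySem

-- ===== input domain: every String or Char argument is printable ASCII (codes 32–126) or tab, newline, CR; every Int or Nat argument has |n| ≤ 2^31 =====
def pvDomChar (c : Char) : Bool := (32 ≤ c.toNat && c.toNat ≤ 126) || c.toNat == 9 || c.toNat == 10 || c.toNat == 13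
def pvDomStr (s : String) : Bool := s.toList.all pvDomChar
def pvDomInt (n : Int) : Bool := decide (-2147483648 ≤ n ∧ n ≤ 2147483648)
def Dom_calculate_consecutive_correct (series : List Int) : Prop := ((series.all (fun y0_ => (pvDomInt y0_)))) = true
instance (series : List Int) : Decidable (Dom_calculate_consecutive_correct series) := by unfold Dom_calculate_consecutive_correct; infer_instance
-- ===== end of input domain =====

-- B replaces A's per-element carried counter with a run-wise traversal (maximal runs of 1s / non-1s), emitting each streak segment at once; alternative decomposition, same cost.


-- ===== PORT A =====
-- literal transliteration of A: a left fold carrying (count, streaks), appending each updated count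
def calculate_consecutive_correct (series : List Int) : List Int :=
  (series.foldl
    (fun (st : Int × List Int) value =>
      let count := if value = 1 then st.1 + 1 else 0
      (count, st.2 ++ [count]))
    (0, [])).2

-- ===== PORT B =====
-- run-wise recursion: split off the maximal run at the head (all 1s, or all non-1s),
-- emit its whole streak segment at once, recurse on the rest (mirrors Source B's groupby loop)
def ccAltRuns (l : List Int) : List Int :=
  match l with
  | [] => []
  | x :: xs =>
    if x = 1 then
      let run := List.takeWhile (fun v => v == 1) (x :: xs)
      ((List.range run.length).map (fun i : Nat => (i : Int) + 1)) ++
        ccAltRuns (List.dropWhile (fun v => v == 1) (x :: xs))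
    else
      let run := List.takeWhile (fun v => !(v == 1)) (x :: xs)
      (run.map (fun _ => (0 : Int))) ++
        ccAltRuns (List.dropWhile (fun v => !(v == 1)) (x :: xs))
termination_by l.length
decreasing_by
  · simp only [List.dropWhile_cons]
    have h1 : (fun v => v == 1) x = true := by simpa using ‹x = 1›
    simp only [h1]
    exact Nat.lt_succ_of_le (List.length_dropWhile_le _ _)
  · simp only [List.dropWhile_cons]
    have h1 : (!(x == 1)) = true := by simpa using ‹¬ x = 1›
    simp only [h1]
    exact Nat.lt_succ_of_le (List.length_dropWhile_le _ _)

def calculate_consecutive_correct_alt (series : List Int) : List Int :=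
  ccAltRuns series

-- ===== PRECONDITION & SPEC =====
def Spec_calculate_consecutive_correct (series : List Int) (out : List Int) : Prop := out = calculate_consecutive_correct_alt series
instance (series : List Int) (out : List Int) : Decidable (Spec_calculate_consecutive_correct series out) := by unfold Spec_calculate_consecutive_correct; infer_instance

-- ===== CLAIM (what is proved, stated in full; the proofs are below) =====
def Claim_equal_calculate_consecutive_correct : Prop := ∀ (series : List Int), Dom_calculate_consecutive_correct series → Spec_calculate_consecutive_correct series (calculate_consecutive_correct series)

-- ===== LEMMAS AND PROOFS =====

-- reference cons-style recursion: the result of A's loop starting with count c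
def ccGo (c : Int) : List Int → List Int
  | [] => []
  | v :: vs =>
    let c' := if v = 1 then c + 1 else 0
    c' :: ccGo c' vs

-- A's foldl with append-accumulator equals acc ++ ccGo
theorem ccA_foldl (l : List Int) : ∀ (c : Int) (acc : List Int),
    (l.foldl (fun (st : Int × List Int) value =>
      let count := if value = 1 then st.1 + 1 else 0
      (count, st.2 ++ [count])) (c, acc)).2 = acc ++ ccGo c l := by
  induction l with
  | nil => intro c acc; simp [ccGo]
  | cons v vs ih =>
      intro c acc
      simp only [List.foldl_cons, ccGo]
      rw [ih]
      simp

-- ccGo over a run of 1s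
theorem ccGo_ones (t : List Int) (ht : ∀ v ∈ t, v = 1) : ∀ (c : Int) (d : List Int),
    ccGo c (t ++ d) = (List.range t.length).map (fun i : Nat => c + 1 + (i : Int)) ++ ccGo (c + t.length) d := by
  induction t with
  | nil => intro c d; simp
  | cons v vs ih =>
      intro c d
      have hv : v = 1 := ht v (by simp)
      simp only [List.cons_append, ccGo, if_pos hv]
      rw [ih (fun w hw => ht w (by simp [hw])) (c + 1) d]
      simp only [List.length_cons, List.range_succ_eq_map, List.map_cons, List.map_map,
        List.cons_append]

      congr 1
      · push_cast; ring
      congr 1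
      · apply List.map_congr_left; intro i _
        simp only [Function.comp]; push_cast; ring
      · congr 1; push_cast; ring

-- ccGo (with count 0) over a run of non-1s: every element resets the count to 0
theorem ccGo_zeros (t : List Int) (ht : ∀ v ∈ t, ¬ v = 1) : ∀ (d : List Int),
    ccGo 0 (t ++ d) = t.map (fun _ => (0 : Int)) ++ ccGo 0 d := by
  induction t with
  | nil => intro d; simp
  | cons v vs ih =>
      intro d
      have hv : ¬ v = 1 := ht v (by simp)
      simp only [List.cons_append, ccGo, if_neg hv, List.map_cons]
      rw [ih (fun w hw => ht w (by simp [hw])) d]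

-- ccGo's count is irrelevant when the list does not start with 1
theorem ccGo_reset (c : Int) (d : List Int) (hd : ∀ y, d.head? = some y → ¬ y = 1) :
    ccGo c d = ccGo 0 d := by
  cases d with
  | nil => rfl
  | cons y ys =>
      have hy : ¬ y = 1 := hd y rfl
      simp [ccGo, if_neg hy]

theorem ccGo_eq_altRuns (l : List Int) : ccGo 0 l = ccAltRuns l := by
  induction hn : l.length using Nat.strong_induction_on generalizing l with
  | _ n ih =>
  cases l with
  | nil => simp [ccGo, ccAltRuns]
  | cons x xs =>
    by_cases hx : x = 1
    · rw [ccAltRuns]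
      simp only [if_pos hx]
      have hsplit : x :: xs =
          List.takeWhile (fun v => v == 1) (x :: xs) ++ List.dropWhile (fun v => v == 1) (x :: xs) :=
        (List.takeWhile_append_dropWhile).symm
      set t := List.takeWhile (fun v => v == 1) (x :: xs) with ht
      set d := List.dropWhile (fun v => v == 1) (x :: xs) with hdd
      have hones : ∀ v ∈ t, v = 1 := by
        intro v hv
        have := List.mem_takeWhile_imp hv
        simpa using this
      have hhead : ∀ y, d.head? = some y → ¬ y = 1 := by
        intro y hy
        have hnot := List.head?_dropWhile_not (fun v => v == 1) (x :: xs)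
        rw [← hdd, hy] at hnot
        simpa using hnot
      have hlt : d.length < n := by
        rw [← hn, hsplit, List.length_append]
        have htne : t ≠ [] := by
          rw [ht]
          simp [hx]
        have : 0 < t.length := List.length_pos_iff.mpr htne
        omega
      rw [hsplit, ccGo_ones t hones 0 d, ccGo_reset _ d hhead, ih d.length hlt d rfl]
      congr 1
      apply List.map_congr_left; intro i _; ring
    · rw [ccAltRuns]
      simp only [if_neg hx]
      have hsplit : x :: xs =
          List.takeWhile (fun v => !(v == 1)) (x :: xs) ++ List.dropWhile (fun v => !(v == 1)) (x :: xs) :=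
        (List.takeWhile_append_dropWhile).symm
      set t := List.takeWhile (fun v => !(v == 1)) (x :: xs) with ht
      set d := List.dropWhile (fun v => !(v == 1)) (x :: xs) with hdd
      have hzeros : ∀ v ∈ t, ¬ v = 1 := by
        intro v hv
        have := List.mem_takeWhile_imp hv
        simpa using this
      have hlt : d.length < n := by
        rw [← hn, hsplit, List.length_append]
        have htne : t ≠ [] := by
          rw [ht]
          simp [hx]
        have : 0 < t.length := List.length_pos_iff.mpr htne
        omega
      rw [hsplit, ccGo_zeros t hzeros d, ih d.length hlt d rfl]

-- ===== VERDICT (by name: the statement is the Claim_ definition above) =====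
theorem calculate_consecutive_correct_spec : Claim_equal_calculate_consecutive_correct := by
  intro series _
  unfold Spec_calculate_consecutive_correct calculate_consecutive_correct calculate_consecutive_correct_alt
  rw [ccA_foldl series 0 []]
  simpa using ccGo_eq_altRuns series
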